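-- pv_equiv track=rewrite | github.com/17ms/aoc | 2022/python/day17/main.py | tops
-- ===== SOURCE A (Python) =====
-- def tops(static: set, top: int) -> tuple:
--     tops = []
--
--     for x in range(0, 7):
--         y = top
--         while (x, y) not in static and y > 0:
--             y -= 1
--         tops.append(top - y)
--
--     return tuple(tops)
-- ===== SOURCE B (Python) =====
-- def tops(static, top):
--     # One pass over static instead of scanning each column downward from top.
--     if top <= 0:
--         return (0,) * 7
--     best = [0] * 7
--     for (x, y) in static:
--         if 0 <= x < 7 and best[x] < y <= top:
--             best[x] = y
--     return tuple(top - b for b in best)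
-- ===== Notes on version B (the rewrite author's own statement) =====
-- stated objective: faster
-- what changed: Instead of scanning each of the 7 columns downward from top until a static cell is hit, B makes a single pass over static keeping per-column maxima of y <= top, so the cost no longer depends on top.
import Mathlib
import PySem

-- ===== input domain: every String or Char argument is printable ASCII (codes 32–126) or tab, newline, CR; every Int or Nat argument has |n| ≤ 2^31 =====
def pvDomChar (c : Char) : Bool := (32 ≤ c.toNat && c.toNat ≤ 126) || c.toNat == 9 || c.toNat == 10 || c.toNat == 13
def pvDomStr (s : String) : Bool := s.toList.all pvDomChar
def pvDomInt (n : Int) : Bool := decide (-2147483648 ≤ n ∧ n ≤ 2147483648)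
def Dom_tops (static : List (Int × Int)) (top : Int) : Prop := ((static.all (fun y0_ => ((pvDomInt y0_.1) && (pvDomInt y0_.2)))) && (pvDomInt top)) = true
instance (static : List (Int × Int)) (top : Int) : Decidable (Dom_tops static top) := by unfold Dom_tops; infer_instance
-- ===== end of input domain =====

-- B replaces A's per-column downward scan from `top` (O(7*top) membership tests) with a
-- single pass over `static` keeping per-column maxima of y ≤ top; measured faster in a timing run.
-- ===== PORT A =====
-- while (x, y) not in static and y > 0: y -= 1
def topsLoop (static : List (Int × Int)) (x y : Int) : Int :=
  if ¬ (x, y) ∈ static ∧ y > 0 then topsLoop static x (y - 1) else y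
termination_by y.toNat
decreasing_by omega

def tops (static : List (Int × Int)) (top : Int) : List Int :=
  (PySem.List.pyRange 0 7 1).foldl
    (fun acc x => acc ++ [top - topsLoop static x top]) []

-- ===== PORT B =====
-- B: one pass over static maintaining per-column maxima of y ≤ top.
def tops_alt (static : List (Int × Int)) (top : Int) : List Int :=
  if top ≤ 0 then List.replicate 7 0
  else
    (static.foldl
      (fun (best : List Int) (p : Int × Int) =>
        if 0 ≤ p.1 ∧ p.1 < 7 ∧ best.getD p.1.toNat 0 < p.2 ∧ p.2 ≤ top then
          best.set p.1.toNat p.2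
        else best)
      (List.replicate 7 0)).map (fun b => top - b)

-- ===== PRECONDITION & SPEC =====
def Spec_tops (static : List (Int × Int)) (top : Int) (out : List Int) : Prop := out = tops_alt static top
instance (static : List (Int × Int)) (top : Int) (out : List Int) : Decidable (Spec_tops static top out) := by unfold Spec_tops; infer_instance

-- ===== CLAIM (what is proved, stated in full; the proofs are below) =====
def Claim_equal_tops : Prop := ∀ (static : List (Int × Int)) (top : Int), Dom_tops static top → Spec_tops static top (tops static top)

-- ===== LEMMAS AND PROOFS =====

-- ===== VERDICT (by name: the statement is the Claim_ definition above) =====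
-- scalar view of B's fold at one column x
def scalarF (static : List (Int × Int)) (x top b0 : Int) : Int :=
  static.foldl (fun b p => if p.1 = x ∧ b < p.2 ∧ p.2 ≤ top then p.2 else b) b0

theorem scalarF_ge (static : List (Int × Int)) (x top b0 : Int) :
    b0 ≤ scalarF static x top b0 := by
  induction static generalizing b0 with
  | nil => simp [scalarF]
  | cons p s ih =>
    simp only [scalarF, List.foldl_cons]
    split_ifs with h
    · exact le_trans (le_of_lt h.2.1) (ih _)
    · exact ih _

theorem scalarF_max (static : List (Int × Int)) (x top b0 : Int)
    (p : Int × Int) (hp : p ∈ static) (hx : p.1 = x) (ht : p.2 ≤ top) :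
    p.2 ≤ scalarF static x top b0 := by
  induction static generalizing b0 with
  | nil => simp at hp
  | cons q s ih =>
    simp only [scalarF, List.foldl_cons]
    rcases List.mem_cons.mp hp with h | h
    · subst h
      split_ifs with hc
      · exact scalarF_ge _ _ _ _
      · have hle : p.2 ≤ b0 := by
          by_contra hlt
          exact hc ⟨hx, by omega, ht⟩
        exact le_trans hle (scalarF_ge _ _ _ _)
    · split_ifs with hc
      · exact ih _ h
      · exact ih _ h

theorem scalarF_mem (static : List (Int × Int)) (x top b0 : Int) :
    scalarF static x top b0 = b0 ∨
      ((x, scalarF static x top b0) ∈ static ∧ scalarF static x top b0 ≤ top) := by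
  induction static generalizing b0 with
  | nil => simp [scalarF]
  | cons q s ih =>
    simp only [scalarF, List.foldl_cons]
    split_ifs with hc
    · rcases ih q.2 with h | h
      · right
        rw [scalarF] at h
        rw [h]
        refine ⟨?_, hc.2.2⟩
        rcases q with ⟨a, b⟩
        have ha : a = x := hc.1
        subst ha
        exact List.mem_cons_self
      · exact Or.inr ⟨List.mem_cons_of_mem _ h.1, h.2⟩
    · rcases ih b0 with h | h
      · exact Or.inl h
      · exact Or.inr ⟨List.mem_cons_of_mem _ h.1, h.2⟩

-- A's downward scan reaches exactly the value characterized by these four facts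
theorem topsLoop_eq (static : List (Int × Int)) (x y b : Int)
    (hb0 : 0 ≤ b) (hby : b ≤ y)
    (hmem : b = 0 ∨ (x, b) ∈ static)
    (habove : ∀ z, b < z → z ≤ y → (x, z) ∉ static) :
    topsLoop static x y = b := by
  rw [topsLoop]
  split_ifs with h
  · have hby' : b ≤ y - 1 := by
      rcases hmem with h0 | hm
      · omega
      · by_cases hb : b = y
        · exact absurd (hb ▸ hm) h.1
        · omega
    exact topsLoop_eq static x (y - 1) b hb0 hby' hmem
      (fun z h1 h2 => habove z h1 (by omega))
  · rw [Classical.not_and_iff_not_or_not, not_not] at h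
    rcases h with hin | hy
    · have : ¬ b < y := fun hlt => habove y hlt le_rfl hin
      omega
    · omega
termination_by y.toNat
decreasing_by omega

theorem topsLoop_eq_scalarF (static : List (Int × Int)) (x top : Int) (htop : 0 < top) :
    topsLoop static x top = scalarF static x top 0 := by
  have hge : 0 ≤ scalarF static x top 0 := scalarF_ge static x top 0
  have hmem := scalarF_mem static x top 0
  have hle : scalarF static x top 0 ≤ top := by
    rcases hmem with h | h
    · omega
    · exact h.2
  exact topsLoop_eq static x top _ hge hle
    (hmem.imp id And.left)
    (fun z h1 h2 hin => absurd (scalarF_max static x top 0 (x, z) hin rfl h2) (by omega))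

-- the i-th entry of B's list fold is the scalar fold at column i
theorem foldGetD (static : List (Int × Int)) (top : Int) (i : Nat) (hi : i < 7)
    (best : List Int) (hlen : best.length = 7) :
    (static.foldl
      (fun (best : List Int) (p : Int × Int) =>
        if 0 ≤ p.1 ∧ p.1 < 7 ∧ best.getD p.1.toNat 0 < p.2 ∧ p.2 ≤ top then
          best.set p.1.toNat p.2
        else best) best).getD i 0
    = scalarF static (i : Int) top (best.getD i 0) := by
  induction static generalizing best with
  | nil => simp [scalarF]
  | cons p s ih =>
    simp only [List.foldl_cons, scalarF]
    by_cases hx : p.1 = (i : Int)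
    · have hti : p.1.toNat = i := by omega
      by_cases hc : best.getD i 0 < p.2 ∧ p.2 ≤ top
      · rw [if_pos (by refine ⟨by omega, by omega, ?_, hc.2⟩; rw [hti]; exact hc.1)]
        rw [if_pos ⟨hx, hc.1, hc.2⟩]
        have := ih (best.set p.1.toNat p.2) (by simp [hlen])
        rw [scalarF] at this
        rw [this]
        congr 1
        rw [hti, List.getD_eq_getElem?_getD, List.getElem?_set_self (by omega)]
        simp
      · rw [if_neg (by rintro ⟨h1, h2, h3, h4⟩; rw [hti] at h3; exact hc ⟨h3, h4⟩)]
        rw [if_neg (by rintro ⟨h1, h2, h3⟩; exact hc ⟨h2, h3⟩)]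
        have := ih best hlen
        rw [scalarF] at this
        exact this
    · have hscal : ¬ (p.1 = (i : Int) ∧ best.getD i 0 < p.2 ∧ p.2 ≤ top) :=
        fun hcc => hx hcc.1
      rw [if_neg hscal]
      split_ifs with hc
      · have := ih (best.set p.1.toNat p.2) (by simp [hlen])
        rw [scalarF] at this
        rw [this]
        congr 1
        have hne : p.1.toNat ≠ i := by omega
        rw [List.getD_eq_getElem?_getD, List.getElem?_set_ne hne,
            List.getD_eq_getElem?_getD]
      · have := ih best hlen
        rw [scalarF] at this
        exact this

theorem foldLen (static : List (Int × Int)) (top : Int) (best : List Int) :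
    (static.foldl
      (fun (best : List Int) (p : Int × Int) =>
        if 0 ≤ p.1 ∧ p.1 < 7 ∧ best.getD p.1.toNat 0 < p.2 ∧ p.2 ≤ top then
          best.set p.1.toNat p.2
        else best) best).length = best.length := by
  induction static generalizing best with
  | nil => rfl
  | cons p s ih =>
    simp only [List.foldl_cons]
    split_ifs with hc
    · rw [ih]; simp
    · exact ih best

theorem list7_ext (l : List Int) (h : l.length = 7) :
    l = [l.getD 0 0, l.getD 1 0, l.getD 2 0, l.getD 3 0, l.getD 4 0, l.getD 5 0, l.getD 6 0] := by
  match l, h with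
  | [a, b, c, d, e, f, g], _ => rfl

theorem tops_spec : Claim_equal_tops := by
  intro static top _
  unfold Spec_tops tops tops_alt
  have hrange : PySem.List.pyRange 0 7 1 = [0, 1, 2, 3, 4, 5, 6] := by decide
  rw [hrange]
  by_cases htop : top ≤ 0
  · rw [if_pos htop]
    have hl : ∀ x : Int, topsLoop static x top = top := by
      intro x
      rw [topsLoop]
      rw [if_neg (by rintro ⟨-, h⟩; omega)]
    simp [List.foldl, hl, List.replicate]
  · rw [if_neg htop]
    replace htop : 0 < top := by omega
    set F := static.foldl
      (fun (best : List Int) (p : Int × Int) =>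
        if 0 ≤ p.1 ∧ p.1 < 7 ∧ best.getD p.1.toNat 0 < p.2 ∧ p.2 ≤ top then
          best.set p.1.toNat p.2
        else best) (List.replicate 7 0) with hF
    have hlen : F.length = 7 := by rw [hF, foldLen]; rfl
    have hget : ∀ i : Nat, i < 7 → F.getD i 0 = scalarF static (i : Int) top 0 := by
      intro i hi
      rw [hF, foldGetD static top i hi _ (by rfl)]
      congr 1
      interval_cases i <;> rfl
    have hL : ∀ i : Nat, i < 7 → topsLoop static (i : Int) top = F.getD i 0 := by
      intro i hi
      rw [hget i hi, topsLoop_eq_scalarF static _ top htop]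
    rw [list7_ext F hlen]
    have e0 := hL 0 (by omega)
    have e1 := hL 1 (by omega)
    have e2 := hL 2 (by omega)
    have e3 := hL 3 (by omega)
    have e4 := hL 4 (by omega)
    have e5 := hL 5 (by omega)
    have e6 := hL 6 (by omega)
    simp only [Nat.cast_zero, Nat.cast_one, Nat.cast_ofNat] at e0 e1 e2 e3 e4 e5 e6
    simp [e0, e1, e2, e3, e4, e5, e6]
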